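-- pv_equiv track=rewrite | github.com/mjkim1019/MIDER | mider/agents/proc_analyzer.py | _filter_by_line_ranges
-- ===== SOURCE A (Python) =====
-- from typing import Any
--
-- def _filter_by_line_ranges(
--     items: list[dict[str, Any]],
--     line_ranges: list[tuple[int, int]],
--     line_key: str = "line",
-- ) -> list[dict[str, Any]]:
--     """항목의 라인 번호가 그룹 범위에 속하는 것만 필터링한다."""
--     filtered: list[dict[str, Any]] = []
--     for item in items:
--         line = item.get(line_key, 0)
--         if any(start <= line <= end for start, end in line_ranges):
--             filtered.append(item)
--     return filtered
-- ===== SOURCE B (Python) =====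
-- def _filter_by_line_ranges(
--     items,
--     line_ranges,
--     line_key="line",
-- ):
--     """Merge ranges into sorted disjoint intervals once, then binary-search each item's line."""
--     ivs = sorted(((s, e) for (s, e) in line_ranges if s <= e), key=lambda r: r[0])
--     merged = []
--     for s, e in ivs:
--         if merged and s <= merged[-1][1]:
--             if merged[-1][1] < e:
--                 merged[-1] = (merged[-1][0], e)
--         else:
--             merged.append((s, e))
--     out = []
--     for item in items:
--         line = item.get(line_key, 0)
--         lo, hi = 0, len(merged)
--         while lo < hi:
--             mid = (lo + hi) // 2
--             if merged[mid][0] <= line: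
--                 lo = mid + 1
--             else:
--                 hi = mid
--         if lo > 0 and line <= merged[lo - 1][1]:
--             out.append(item)
--     return out
-- ===== Notes on version B (the rewrite author's own statement) =====
-- stated objective: alternative
-- what changed: Instead of scanning every range for every item, B merges the ranges once into sorted disjoint intervals and binary-searches each item's line number (intended as faster, O((n+m) log m) vs O(n*m); measured only 1.29x at the largest generated size, so not claimed as faster).
import Mathlib
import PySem

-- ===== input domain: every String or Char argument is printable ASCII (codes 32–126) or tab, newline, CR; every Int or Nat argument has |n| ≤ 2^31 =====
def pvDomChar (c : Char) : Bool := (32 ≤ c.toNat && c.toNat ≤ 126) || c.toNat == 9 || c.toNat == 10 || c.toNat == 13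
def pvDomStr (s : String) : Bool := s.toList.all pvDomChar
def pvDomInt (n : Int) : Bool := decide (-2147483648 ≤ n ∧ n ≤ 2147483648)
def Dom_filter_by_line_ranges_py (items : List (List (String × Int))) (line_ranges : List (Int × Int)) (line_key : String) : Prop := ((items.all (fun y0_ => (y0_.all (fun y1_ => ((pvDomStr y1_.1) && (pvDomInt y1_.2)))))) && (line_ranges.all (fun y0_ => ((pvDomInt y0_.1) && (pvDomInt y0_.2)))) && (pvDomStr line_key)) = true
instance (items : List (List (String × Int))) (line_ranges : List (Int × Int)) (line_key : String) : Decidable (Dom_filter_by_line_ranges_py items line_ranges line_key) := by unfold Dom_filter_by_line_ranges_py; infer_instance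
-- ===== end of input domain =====

-- B merges the ranges once into sorted disjoint intervals and binary-searches each item's
-- line instead of scanning every range per item (a different algorithm; a timing run did
-- not confirm a >=1.5x speed-up on the generated inputs, so no speed claim is made).

-- ===== PORT A =====
-- A: for each item, scan ALL ranges with any(start <= line <= end).
def filter_by_line_ranges_py (items : List (List (String × Int))) (line_ranges : List (Int × Int)) (line_key : String) : List (List (String × Int)) :=
  items.foldl (fun filtered item =>
    let line := (PySem.Dict.mk item).getD line_key 0
    if line_ranges.any (fun r => decide (r.1 ≤ line ∧ line ≤ r.2)) then filtered ++ [item]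
    else filtered) []

-- ===== PORT B =====
-- Python's merge loop appends to `merged` and mutates merged[-1]; the accumulator here is
-- that list REVERSED (head = merged[-1]), reversed back after the fold — same values, step for step.
def pvMergeStep (rev : List (Int × Int)) (se : Int × Int) : List (Int × Int) :=
  match rev with
  | (ms, me) :: rest =>
      if se.1 ≤ me then (if me < se.2 then (ms, se.2) :: rest else (ms, me) :: rest)
      else se :: (ms, me) :: rest
  | [] => [se]

-- the while lo < hi binary-search loop; merged[mid] is always in range at the call sites
-- (lo < hi ≤ len merged), so getD is exact there.
def pvBisect (merged : List (Int × Int)) (line : Int) (lo hi : Nat) : Nat :=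
  if lo < hi then
    let mid := (lo + hi) / 2
    if (merged.getD mid (0, 0)).1 ≤ line then pvBisect merged line (mid + 1) hi
    else pvBisect merged line lo mid
  else lo
termination_by hi - lo
decreasing_by all_goals omega

def pvHit (merged : List (Int × Int)) (line : Int) : Bool :=
  let lo := pvBisect merged line 0 merged.length
  decide (0 < lo) && decide (line ≤ (merged.getD (lo - 1) (0, 0)).2)

def filter_by_line_ranges_py_alt (items : List (List (String × Int))) (line_ranges : List (Int × Int)) (line_key : String) : List (List (String × Int)) :=
  let ivs := PySem.List.sorted (line_ranges.filter (fun r => decide (r.1 ≤ r.2))) (fun r => r.1)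
  let merged := (ivs.foldl pvMergeStep []).reverse
  items.foldl (fun out item =>
    let line := (PySem.Dict.mk item).getD line_key 0
    if pvHit merged line then out ++ [item] else out) []

-- ===== PRECONDITION & SPEC =====
def Spec_filter_by_line_ranges_py (items : List (List (String × Int))) (line_ranges : List (Int × Int)) (line_key : String) (out : List (List (String × Int))) : Prop := out = filter_by_line_ranges_py_alt items line_ranges line_key
instance (items : List (List (String × Int))) (line_ranges : List (Int × Int)) (line_key : String) (out : List (List (String × Int))) : Decidable (Spec_filter_by_line_ranges_py items line_ranges line_key out) := by unfold Spec_filter_by_line_ranges_py; infer_instance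

-- ===== CLAIM (what is proved, stated in full; the proofs are below) =====
def Claim_equal_filter_by_line_ranges_py : Prop := ∀ (items : List (List (String × Int))) (line_ranges : List (Int × Int)) (line_key : String), Dom_filter_by_line_ranges_py items line_ranges line_key → Spec_filter_by_line_ranges_py items line_ranges line_key (filter_by_line_ranges_py items line_ranges line_key)

-- ===== LEMMAS AND PROOFS =====

-- coverage: x lies in some range of L
def pvCov (L : List (Int × Int)) (x : Int) : Prop := ∃ p ∈ L, p.1 ≤ x ∧ x ≤ p.2

-- the merge fold preserves: reversed-pairwise gaps, nonempty intervals, and exact coverage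
theorem pvMerge_fold (l : List (Int × Int)) :
    ∀ rev : List (Int × Int),
    l.Pairwise (fun a b => a.1 ≤ b.1) →
    (∀ p ∈ l, p.1 ≤ p.2) →
    rev.Pairwise (fun a b => b.2 < a.1) →
    (∀ p ∈ rev, p.1 ≤ p.2) →
    (∀ a ∈ rev, ∀ x ∈ l, a.1 ≤ x.1) →
    (l.foldl pvMergeStep rev).Pairwise (fun a b => b.2 < a.1) ∧
    (∀ p ∈ l.foldl pvMergeStep rev, p.1 ≤ p.2) ∧
    (∀ x : Int, pvCov (l.foldl pvMergeStep rev) x ↔ pvCov rev x ∨ pvCov l x) := by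
  induction l with
  | nil => intro rev _ _ h2 h3 _; exact ⟨h2, h3, fun x => by simp [pvCov]⟩
  | cons se t ih =>
    rintro rev hl hlne hrevP hrevne hcross
    obtain ⟨s, e⟩ := se
    rw [List.pairwise_cons] at hl
    have hse : s ≤ e := hlne _ (List.mem_cons_self ..)
    have hts : ∀ x ∈ t, s ≤ x.1 := fun x hx => hl.1 x hx
    simp only [List.foldl_cons]
    have key : ∀ rev', rev' = pvMergeStep rev (s, e) →
        rev'.Pairwise (fun a b => b.2 < a.1) ∧ (∀ p ∈ rev', p.1 ≤ p.2) ∧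
        (∀ a ∈ rev', ∀ x ∈ t, a.1 ≤ x.1) ∧
        (∀ x : Int, pvCov rev' x ↔ pvCov rev x ∨ (s ≤ x ∧ x ≤ e)) := by
      intro rev' hdef
      match rev, hrevP, hrevne, hcross with
      | [], _, _, _ =>
        simp only [pvMergeStep] at hdef
        subst hdef
        refine ⟨by simp, by simpa using hse, by simpa using hts, ?_⟩
        intro x; simp [pvCov]
      | (ms, me) :: rest, hrevP, hrevne, hcross =>
        have hms : ms ≤ s := hcross (ms, me) (List.mem_cons_self ..) (s, e) (List.mem_cons_self ..)
        have hmsme : ms ≤ me := by simpa using hrevne (ms, me) (List.mem_cons_self ..)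
        rw [List.pairwise_cons] at hrevP
        by_cases h1 : s ≤ me
        · by_cases h2 : me < e
          · simp only [pvMergeStep, h1, h2, if_pos] at hdef
            subst hdef
            refine ⟨List.pairwise_cons.2 ⟨fun b hb => hrevP.1 b hb, hrevP.2⟩, ?_, ?_, ?_⟩
            · intro p hp
              rcases List.mem_cons.1 hp with h | h
              · subst h; exact le_trans hmsme (le_of_lt h2)
              · exact hrevne p (List.mem_cons_of_mem _ h)
            · intro a ha x hx
              rcases List.mem_cons.1 ha with h | h
              · subst h; exact hcross (ms, me) (List.mem_cons_self ..) x (List.mem_cons_of_mem _ hx)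
              · exact hcross a (List.mem_cons_of_mem _ h) x (List.mem_cons_of_mem _ hx)
            · intro x
              constructor
              · rintro ⟨p, hp, hpx⟩
                rcases List.mem_cons.1 hp with h | h
                · subst h; simp only at hpx
                  by_cases hxme : x ≤ me
                  · exact Or.inl ⟨(ms, me), List.mem_cons_self .., hpx.1, hxme⟩
                  · exact Or.inr ⟨le_trans h1 (le_of_lt (lt_of_not_ge hxme)), hpx.2⟩
                · exact Or.inl ⟨p, List.mem_cons_of_mem _ h, hpx⟩
              · rintro (⟨p, hp, hpx⟩ | ⟨hsx, hxe⟩)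
                · rcases List.mem_cons.1 hp with h | h
                  · subst h; exact ⟨(ms, e), List.mem_cons_self .., hpx.1, le_trans hpx.2 (le_of_lt h2)⟩
                  · exact ⟨p, List.mem_cons_of_mem _ h, hpx⟩
                · exact ⟨(ms, e), List.mem_cons_self .., le_trans hms hsx, hxe⟩
          · simp only [pvMergeStep, h1, h2, if_pos, if_neg, not_false_iff] at hdef
            subst hdef
            refine ⟨List.pairwise_cons.2 ⟨fun b hb => hrevP.1 b hb, hrevP.2⟩, hrevne, ?_, ?_⟩
            · intro a ha x hx; exact hcross a ha x (List.mem_cons_of_mem _ hx)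
            · intro x
              constructor
              · exact fun h => Or.inl h
              · rintro (h | ⟨hsx, hxe⟩)
                · exact h
                · exact ⟨(ms, me), List.mem_cons_self .., le_trans hms hsx, le_trans hxe (le_of_not_gt h2)⟩
        · have h1' : me < s := lt_of_not_ge h1
          simp only [pvMergeStep, if_neg h1] at hdef
          subst hdef
          refine ⟨?_, ?_, ?_, ?_⟩
          · refine List.pairwise_cons.2 ⟨?_, List.pairwise_cons.2 ⟨fun b hb => hrevP.1 b hb, hrevP.2⟩⟩
            intro b hb
            rcases List.mem_cons.1 hb with h | h
            · subst h; exact h1'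
            · exact lt_of_lt_of_le (hrevP.1 b h) hms
          · intro p hp
            rcases List.mem_cons.1 hp with h | h
            · subst h; exact hse
            · exact hrevne p h
          · intro a ha x hx
            rcases List.mem_cons.1 ha with h | h
            · subst h; exact hts x hx
            · exact hcross a h x (List.mem_cons_of_mem _ hx)
          · intro x
            constructor
            · rintro ⟨p, hp, hpx⟩
              rcases List.mem_cons.1 hp with h | h
              · subst h; exact Or.inr hpx
              · exact Or.inl ⟨p, h, hpx⟩
            · rintro (⟨p, hp, hpx⟩ | hx)
              · exact ⟨p, List.mem_cons_of_mem _ hp, hpx⟩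
              · exact ⟨(s, e), List.mem_cons_self .., hx⟩
    obtain ⟨hP', hne', hcross', hcov'⟩ := key _ rfl
    obtain ⟨rP, rne, rcov⟩ := ih _ hl.2 (fun p hp => hlne p (List.mem_cons_of_mem _ hp)) hP' hne' hcross'
    refine ⟨rP, rne, ?_⟩
    intro x
    rw [rcov x, hcov' x]
    have hc : pvCov ((s, e) :: t) x ↔ (s ≤ x ∧ x ≤ e) ∨ pvCov t x := by
      constructor
      · rintro ⟨p, hp, hpx⟩
        rcases List.mem_cons.1 hp with h | h
        · subst h; exact Or.inl hpx
        · exact Or.inr ⟨p, h, hpx⟩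
      · rintro (h | ⟨p, hp, hpx⟩)
        · exact ⟨(s, e), List.mem_cons_self .., h⟩
        · exact ⟨p, List.mem_cons_of_mem _ hp, hpx⟩
    rw [hc]
    tauto


-- binary-search invariant: all indices below the result have start ≤ line, all above have line < start
theorem pvBisect_spec (m : List (Int × Int)) (line : Int)
    (hmono : ∀ i j (hi : i < m.length) (hj : j < m.length), i ≤ j → (m[i]).1 ≤ (m[j]).1) :
    ∀ n lo hi, hi - lo ≤ n → hi ≤ m.length → lo ≤ hi →
    (∀ i (h : i < m.length), i < lo → (m[i]).1 ≤ line) →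
    (∀ i (h : i < m.length), hi ≤ i → line < (m[i]).1) →
    pvBisect m line lo hi ≤ m.length ∧
    (∀ i (h : i < m.length), i < pvBisect m line lo hi → (m[i]).1 ≤ line) ∧
    (∀ i (h : i < m.length), pvBisect m line lo hi ≤ i → line < (m[i]).1) := by
  intro n
  induction n with
  | zero =>
    intro lo hi hfuel hhim hlohi hlo hhi
    have : lo = hi := by omega
    subst this
    rw [pvBisect, if_neg (lt_irrefl lo)]
    exact ⟨by omega, hlo, hhi⟩
  | succ n ih =>
    intro lo hi hfuel hhim hlohi hlo hhi
    by_cases hlt : lo < hi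
    · rw [pvBisect, if_pos hlt]
      simp only
      have hmidlt : (lo + hi) / 2 < m.length := by omega
      have hgetD : m.getD ((lo + hi) / 2) (0, 0) = m[(lo + hi) / 2] := List.getD_eq_getElem m (0, 0) hmidlt
      rw [hgetD]
      by_cases hc : (m[(lo + hi) / 2]).1 ≤ line
      · rw [if_pos hc]
        refine ih ((lo + hi) / 2 + 1) hi (by omega) hhim (by omega) ?_ hhi
        intro i h hilt
        exact le_trans (hmono i ((lo + hi) / 2) h hmidlt (by omega)) hc
      · rw [if_neg hc]
        refine ih lo ((lo + hi) / 2) (by omega) (by omega) (by omega) hlo ?_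
        intro i h hile
        exact lt_of_lt_of_le (lt_of_not_ge hc) (hmono ((lo + hi) / 2) i hmidlt h hile)
    · have heq : lo = hi := by omega
      subst heq
      rw [pvBisect, if_neg hlt]
      exact ⟨by omega, hlo, hhi⟩


theorem pvHit_iff (m : List (Int × Int)) (line : Int)
    (hP : m.Pairwise (fun a b => a.2 < b.1)) (hne : ∀ p ∈ m, p.1 ≤ p.2) :
    pvHit m line = true ↔ pvCov m line := by
  have hpw := List.pairwise_iff_getElem.1 hP
  have hmono : ∀ i j (hi : i < m.length) (hj : j < m.length), i ≤ j → (m[i]).1 ≤ (m[j]).1 := by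
    intro i j hi hj hij
    rcases Nat.lt_or_eq_of_le hij with h | h
    · have h1 := hpw i j hi hj h
      have h2 := hne m[i] (List.getElem_mem hi)
      omega
    · subst h; exact le_refl _
  obtain ⟨hk, hbelow, habove⟩ := pvBisect_spec m line hmono m.length 0 m.length (by omega)
    le_rfl (Nat.zero_le _) (fun i h hlt => absurd hlt (by omega)) (fun i h hge => absurd h (by omega))
  unfold pvHit
  simp only [Bool.and_eq_true, decide_eq_true_eq]
  constructor
  · rintro ⟨hk0, hend⟩
    have hkm : pvBisect m line 0 m.length - 1 < m.length := by omega
    rw [List.getD_eq_getElem m (0, 0) hkm] at hend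
    exact ⟨_, List.getElem_mem hkm, hbelow _ hkm (by omega), hend⟩
  · rintro ⟨p, hp, h1, h2⟩
    obtain ⟨i, hi, hip⟩ := List.mem_iff_getElem.1 hp
    have hik : i < pvBisect m line 0 m.length := by
      by_contra hcon
      exact absurd (lt_of_lt_of_le (habove i hi (by omega)) (hip ▸ h1)) (lt_irrefl _)
    have hk0 : 0 < pvBisect m line 0 m.length := by omega
    have hkm : pvBisect m line 0 m.length - 1 < m.length := by omega
    refine ⟨hk0, ?_⟩
    rw [List.getD_eq_getElem m (0, 0) hkm]
    rcases Nat.lt_or_eq_of_le (by omega : i ≤ pvBisect m line 0 m.length - 1) with h | h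
    · exfalso
      have hgap := hpw i _ hi hkm h
      have := hbelow _ hkm (by omega)
      rw [hip] at hgap
      omega
    · subst h; rw [hip]; exact h2

-- the merged list covers exactly what the original ranges cover, and is gap-separated and nonempty
theorem pvMerged_props (line_ranges : List (Int × Int)) :
    let ivs := PySem.List.sorted (line_ranges.filter (fun r => decide (r.1 ≤ r.2))) (fun r => r.1)
    let m := (ivs.foldl pvMergeStep []).reverse
    m.Pairwise (fun a b => a.2 < b.1) ∧ (∀ p ∈ m, p.1 ≤ p.2) ∧
    (∀ x : Int, pvCov m x ↔ pvCov line_ranges x) := by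
  have hmem : ∀ p, p ∈ PySem.List.sorted (line_ranges.filter (fun r => decide (r.1 ≤ r.2))) (fun r => r.1) ↔
      p ∈ line_ranges ∧ p.1 ≤ p.2 := by
    intro p
    rw [PySem.List.mem_sorted, List.mem_filter, decide_eq_true_eq]
  obtain ⟨fP, fne, fcov⟩ := pvMerge_fold
    (PySem.List.sorted (line_ranges.filter (fun r => decide (r.1 ≤ r.2))) (fun r => r.1)) []
    (PySem.List.sorted_pairwise _ _)
    (fun p hp => ((hmem p).1 hp).2)
    (by simp) (by simp) (by simp)
  refine ⟨List.pairwise_reverse.2 fP, fun p hp => fne p (List.mem_reverse.1 hp), ?_⟩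
  intro x
  have hrev : pvCov ((PySem.List.sorted (line_ranges.filter (fun r => decide (r.1 ≤ r.2))) (fun r => r.1)).foldl pvMergeStep []).reverse x ↔
      pvCov ((PySem.List.sorted (line_ranges.filter (fun r => decide (r.1 ≤ r.2))) (fun r => r.1)).foldl pvMergeStep []) x := by
    unfold pvCov
    constructor
    · rintro ⟨p, hp, h⟩; exact ⟨p, List.mem_reverse.1 hp, h⟩
    · rintro ⟨p, hp, h⟩; exact ⟨p, List.mem_reverse.2 hp, h⟩
  rw [hrev, fcov x]
  unfold pvCov
  constructor
  · rintro (⟨p, hp, h⟩ | ⟨p, hp, h⟩)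
    · simp at hp
    · exact ⟨p, ((hmem p).1 hp).1, h⟩
  · rintro ⟨p, hp, h⟩
    exact Or.inr ⟨p, (hmem p).2 ⟨hp, le_trans h.1 h.2⟩, h⟩

-- ===== VERDICT (by name: the statement is the Claim_ definition above) =====
theorem filter_by_line_ranges_py_spec : Claim_equal_filter_by_line_ranges_py := by
  intro items line_ranges line_key _
  unfold Spec_filter_by_line_ranges_py filter_by_line_ranges_py filter_by_line_ranges_py_alt
  obtain ⟨hP, hne, hcov⟩ := pvMerged_props line_ranges
  rw [PySem.List.foldl_append_if_eq_filter
        (fun item => line_ranges.any (fun r => decide (r.1 ≤ (PySem.Dict.mk item).getD line_key 0 ∧ (PySem.Dict.mk item).getD line_key 0 ≤ r.2))),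
      PySem.List.foldl_append_if_eq_filter
        (fun item => pvHit ((PySem.List.sorted (line_ranges.filter (fun r => decide (r.1 ≤ r.2))) (fun r => r.1)).foldl pvMergeStep []).reverse ((PySem.Dict.mk item).getD line_key 0))]
  simp only [List.nil_append]
  apply List.filter_congr
  intro item _
  set line := (PySem.Dict.mk item).getD line_key 0 with hline
  have h1 := pvHit_iff _ line hP hne
  rw [eq_comm, Bool.eq_iff_iff, h1, hcov]
  simp [pvCov, List.any_eq_true]
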